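-- pv_equiv track=rewrite | github.com/hoonkiyeo/baekjoon-algorithms | combinatorics, number theory/find_integer.py | check_integer
-- ===== SOURCE A (Python) =====
-- def check_integer(lst, n):
--     rem_list = []
--     for N in lst:
--         remainder = N % n
--         rem_list.append(remainder)
--     rem_list = list(set(rem_list))
--     if len(rem_list) == 1:
--         return True
--     return False
-- ===== SOURCE B (Python) =====
-- def check_integer(lst, n):
--     if not lst:
--         return False
--     first = lst[0]
--     g = 0
--     for x in lst:
--         d = abs(x - first)
--         while d:
--             g, d = d, g % d
--     return g % n == 0
-- ===== Notes on version B (the rewrite author's own statement) =====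
-- stated objective: alternative
-- what changed: B replaces A's collect-remainders-then-set-deduplicate test with a number-theoretic algorithm: it folds the Euclidean gcd of |x - lst[0]| over the list and returns whether n divides that gcd, never computing a per-element remainder or building any list/set.
import Mathlib
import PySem

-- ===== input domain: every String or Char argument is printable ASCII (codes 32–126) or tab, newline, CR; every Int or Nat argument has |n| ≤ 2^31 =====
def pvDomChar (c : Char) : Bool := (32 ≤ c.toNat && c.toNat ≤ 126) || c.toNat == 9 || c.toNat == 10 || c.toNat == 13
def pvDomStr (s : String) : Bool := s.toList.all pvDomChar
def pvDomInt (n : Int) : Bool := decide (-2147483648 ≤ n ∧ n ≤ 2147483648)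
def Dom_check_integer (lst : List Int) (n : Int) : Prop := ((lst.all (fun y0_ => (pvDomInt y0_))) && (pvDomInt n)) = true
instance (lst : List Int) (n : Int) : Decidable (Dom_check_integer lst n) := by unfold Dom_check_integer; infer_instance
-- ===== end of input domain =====

-- B replaces A's remainder-set test with a gcd-based divisibility test: fold the Euclidean
-- gcd of |x - lst[0]| over the list and return whether n divides it (objective: alternative).

-- ===== PORT A =====
def check_integer (lst : List Int) (n : Int) : Bool :=
  let rem_list := lst.foldl (fun acc N => acc ++ [PySem.Int.mod N n]) []
  let rem_list := PySem.Set.ofList rem_list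
  if rem_list.length = 1 then true else false

-- ===== PORT B =====
-- termination lemma for B's `while d: g, d = d, g % d` loop
theorem pvModNatAbsLt (g d : Int) (hd : d ≠ 0) : (PySem.Int.mod g d).natAbs < d.natAbs := by
  rcases lt_or_gt_of_ne hd with h | h
  · have := PySem.Int.mod_neg_bounds (a := g) h
    omega
  · have h1 := PySem.Int.mod_nonneg (a := g) h
    have h2 := PySem.Int.mod_lt (a := g) h
    omega

-- B's inner while loop: g, d = d, g % d until d == 0
def gcdLoop (g d : Int) : Int :=
  if h : d = 0 then g else gcdLoop d (PySem.Int.mod g d)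
termination_by d.natAbs
decreasing_by exact pvModNatAbsLt g d h

def check_integer_alt (lst : List Int) (n : Int) : Bool :=
  match lst with
  | [] => false
  | first :: _ =>
    let g := lst.foldl (fun g x => gcdLoop g (|x - first|)) 0
    PySem.Int.mod g n == 0

-- ===== PRECONDITION & SPEC =====
-- Pre_ excludes only nonempty lst with n = 0, where A raises ZeroDivisionError (B raises there too).
def Pre_check_integer (lst : List Int) (n : Int) : Prop := lst = [] ∨ n ≠ 0
instance (lst : List Int) (n : Int) : Decidable (Pre_check_integer lst n) := by unfold Pre_check_integer; infer_instance
def pvWitness_check_integer : List Int × Int := ([3, 10, 17], 7)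
def Spec_check_integer (lst : List Int) (n : Int) (out : Bool) : Prop := out = check_integer_alt lst n
instance (lst : List Int) (n : Int) (out : Bool) : Decidable (Spec_check_integer lst n out) := by unfold Spec_check_integer; infer_instance

-- ===== CLAIM (what is proved, stated in full; the proofs are below) =====
def Claim_equal_check_integer : Prop := ∀ (lst : List Int) (n : Int), Dom_check_integer lst n → Pre_check_integer lst n → Spec_check_integer lst n (check_integer lst n)

-- ===== LEMMAS AND PROOFS =====

theorem gcdLoop_dvd (g d : Int) : gcdLoop g d ∣ g ∧ gcdLoop g d ∣ d := by
  by_cases h : d = 0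
  · subst h; simp [gcdLoop]
  · rw [gcdLoop, dif_neg h]
    obtain ⟨h1, h2⟩ := gcdLoop_dvd d (PySem.Int.mod g d)
    refine ⟨?_, h1⟩
    have hd2 : gcdLoop d (PySem.Int.mod g d) ∣ PySem.Int.floordiv g d * d + PySem.Int.mod g d :=
      dvd_add (Dvd.dvd.mul_left h1 _) h2
    rwa [PySem.Int.floordiv_mul_add_mod] at hd2
termination_by d.natAbs
decreasing_by exact pvModNatAbsLt g d h

theorem dvd_gcdLoop (k g d : Int) (hk1 : k ∣ g) (hk2 : k ∣ d) : k ∣ gcdLoop g d := by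
  by_cases h : d = 0
  · subst h; simpa [gcdLoop] using hk1
  · rw [gcdLoop, dif_neg h]
    apply dvd_gcdLoop k d (PySem.Int.mod g d) hk2
    have hg : PySem.Int.mod g d = g - PySem.Int.floordiv g d * d := by
      have := PySem.Int.floordiv_mul_add_mod g d; omega
    rw [hg]
    exact dvd_sub hk1 (Dvd.dvd.mul_left hk2 _)
termination_by d.natAbs
decreasing_by exact pvModNatAbsLt g d h

theorem dvd_gcdLoop_iff (k g d : Int) : k ∣ gcdLoop g d ↔ k ∣ g ∧ k ∣ d := by
  constructor
  · intro h
    obtain ⟨h1, h2⟩ := gcdLoop_dvd g d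
    exact ⟨dvd_trans h h1, dvd_trans h h2⟩
  · rintro ⟨h1, h2⟩
    exact dvd_gcdLoop k g d h1 h2

-- n divides the folded gcd iff it divides every |x - first| seen
theorem dvd_foldl_gcdLoop (n first : Int) (xs : List Int) (g : Int) :
    (n ∣ xs.foldl (fun g x => gcdLoop g (|x - first|)) g) ↔
      (n ∣ g ∧ ∀ x ∈ xs, n ∣ (x - first)) := by
  induction xs generalizing g with
  | nil => simp
  | cons a t ih =>
    simp only [List.foldl, ih, dvd_gcdLoop_iff, dvd_abs, List.mem_cons]
    constructor
    · rintro ⟨⟨h1, h2⟩, h3⟩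
      exact ⟨h1, fun x hx => hx.elim (fun e => e ▸ h2) (h3 x)⟩
    · rintro ⟨h1, h2⟩
      exact ⟨⟨h1, h2 a (Or.inl rfl)⟩, fun x hx => h2 x (Or.inr hx)⟩

-- equal Python remainders mod n (n ≠ 0) is exactly divisibility of the difference
theorem mod_eq_mod_iff_dvd_sub (x h n : Int) (hn : n ≠ 0) :
    PySem.Int.mod x n = PySem.Int.mod h n ↔ n ∣ (x - h) := by
  have ex : x = PySem.Int.floordiv x n * n + PySem.Int.mod x n :=
    (PySem.Int.floordiv_mul_add_mod x n).symm
  have eh : h = PySem.Int.floordiv h n * n + PySem.Int.mod h n :=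
    (PySem.Int.floordiv_mul_add_mod h n).symm
  constructor
  · intro heq
    refine ⟨PySem.Int.floordiv x n - PySem.Int.floordiv h n, ?_⟩
    rw [mul_sub]
    linear_combination ex - eh + heq
  · rintro ⟨k, hk⟩
    have hdvd : n ∣ (PySem.Int.mod x n - PySem.Int.mod h n) := by
      refine ⟨k - PySem.Int.floordiv x n + PySem.Int.floordiv h n, ?_⟩
      linear_combination hk - ex + eh
    have hb : (PySem.Int.mod x n - PySem.Int.mod h n).natAbs < n.natAbs := by
      rcases lt_or_gt_of_ne hn with hneg | hpos
      · have b1 := PySem.Int.mod_neg_bounds (a := x) hneg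
        have b2 := PySem.Int.mod_neg_bounds (a := h) hneg
        omega
      · have b1 := PySem.Int.mod_nonneg (a := x) hpos
        have b2 := PySem.Int.mod_lt (a := x) hpos
        have b3 := PySem.Int.mod_nonneg (a := h) hpos
        have b4 := PySem.Int.mod_lt (a := h) hpos
        omega
    have hz := Int.eq_zero_of_dvd_of_natAbs_lt_natAbs hdvd hb
    omega

theorem foldl_append_map_pv (lst : List Int) (n : Int) (acc : List Int) :
    lst.foldl (fun acc N => acc ++ [PySem.Int.mod N n]) acc
      = acc ++ lst.map (fun N => PySem.Int.mod N n) := by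
  induction lst generalizing acc with
  | nil => simp
  | cons h t ih => simp [List.foldl, ih]

theorem len_ofList_eq_one_iff (xs : List Int) :
    (PySem.Set.ofList xs).length = 1 ↔ ∃ r, xs ≠ [] ∧ ∀ x ∈ xs, x = r := by
  constructor
  · intro h
    obtain ⟨r, hr⟩ : ∃ r, PySem.Set.ofList xs = [r] := by
      cases hofl : PySem.Set.ofList xs with
      | nil => simp [hofl] at h
      | cons a t =>
        cases t with
        | nil => exact ⟨a, rfl⟩
        | cons b u => simp [hofl] at h
    refine ⟨r, ?_, ?_⟩
    · intro hnil
      subst hnil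
      simp [PySem.Set.ofList] at hr
    · intro x hx
      have : x ∈ PySem.Set.ofList xs := (PySem.Set.mem_ofList _ _).2 hx
      rw [hr] at this
      simpa using this
  · rintro ⟨r, hne, hall⟩
    have hsub : ∀ x ∈ PySem.Set.ofList xs, x = r := by
      intro x hx
      exact hall x ((PySem.Set.mem_ofList _ _).1 hx)
    have hmem : r ∈ PySem.Set.ofList xs := by
      apply (PySem.Set.mem_ofList _ _).2
      cases xs with
      | nil => exact absurd rfl hne
      | cons a t => simp [hall a (by simp)]
    have hnd : (PySem.Set.ofList xs).Nodup := PySem.Set.nodup_ofList xs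
    cases hofl : PySem.Set.ofList xs with
    | nil => rw [hofl] at hmem; simp at hmem
    | cons a t =>
      rw [hofl] at hsub hnd
      cases t with
      | nil => rfl
      | cons b u =>
        have ha : a = r := hsub a (by simp)
        have hb : b = r := hsub b (by simp)
        subst ha; subst hb
        simp at hnd

-- ===== VERDICT (by name: the statement is the Claim_ definition above) =====
theorem check_integer_spec : Claim_equal_check_integer := by
  intro lst n _ hpre
  unfold Spec_check_integer check_integer check_integer_alt
  rw [foldl_append_map_pv]
  simp only [List.nil_append]
  cases lst with
  | nil => simp [PySem.Set.ofList]
  | cons first t =>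
    have hn : n ≠ 0 := by
      rcases hpre with h | h
      · simp at h
      · exact h
    -- A's condition: every remainder equals the first one
    have hA : (PySem.Set.ofList ((first :: t).map (fun N => PySem.Int.mod N n))).length = 1 ↔
        ∀ x ∈ first :: t, PySem.Int.mod x n = PySem.Int.mod first n := by
      rw [len_ofList_eq_one_iff]
      constructor
      · rintro ⟨r, _, hall⟩
        intro x hx
        have h1 := hall _ (List.mem_map_of_mem hx)
        have h2 := hall _ (List.mem_map_of_mem (List.mem_cons_self))
        rw [h1, h2]
      · intro hall
        exact ⟨PySem.Int.mod first n, by simp, by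
          intro x hx
          obtain ⟨N, hN, rfl⟩ := List.mem_map.1 hx
          exact hall N hN⟩
    -- B's condition: n divides the folded gcd
    have hB : (PySem.Int.mod ((first :: t).foldl (fun g x => gcdLoop g (|x - first|)) 0) n = 0) ↔
        ∀ x ∈ first :: t, n ∣ (x - first) := by
      rw [PySem.Int.mod_eq_zero_iff_dvd, dvd_foldl_gcdLoop]
      simp
    have hlink : (∀ x ∈ first :: t, PySem.Int.mod x n = PySem.Int.mod first n) ↔
        ∀ x ∈ first :: t, n ∣ (x - first) := by
      constructor <;> intro hall x hx
      · exact (mod_eq_mod_iff_dvd_sub x first n hn).1 (hall x hx)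
      · exact (mod_eq_mod_iff_dvd_sub x first n hn).2 (hall x hx)
    by_cases hc : (PySem.Set.ofList ((first :: t).map (fun N => PySem.Int.mod N n))).length = 1
    · simp only [hc, if_true]
      symm
      rw [beq_iff_eq]
      exact hB.2 (hlink.1 (hA.1 hc))
    · simp only [if_neg hc]
      symm
      rw [beq_eq_false_iff_ne]
      intro hall
      exact hc (hA.2 (hlink.2 (hB.1 hall)))
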